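-- pv_equiv track=rewrite | github.com/bait9test/logslice | logslice/filters.py | filter_level
-- ===== SOURCE A (Python) =====
-- from typing import Callable, Iterable, Iterator, List, Optional
--
-- _LEVELS = ["DEBUG", "INFO", "WARN", "WARNING", "ERROR", "CRITICAL", "FATAL"]
--
-- _LEVEL_RANK = {lvl: i for i, lvl in enumerate(_LEVELS)}
--
-- def _line_level(line: str) -> Optional[str]:
--     """Return the log level token found in *line*, or None."""
--     upper = line.upper()
--     for lvl in _LEVELS:
--         if lvl in upper:
--             return lvl
--     return None
--
-- def filter_level(
--     lines: Iterable[str],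
--     min_level: str,
-- ) -> Iterator[str]:
--     """
--     Yield lines whose log level is >= *min_level* in severity.
--
--     Lines without a recognisable level token are always passed through.
--     """
--     min_rank = _LEVEL_RANK.get(min_level.upper())
--     if min_rank is None:
--         raise ValueError(f"Unknown log level: {min_level!r}. Choose from {_LEVELS}")
--
--     for line in lines:
--         lvl = _line_level(line)
--         if lvl is None:
--             yield line
--             continue
--         if _LEVEL_RANK.get(lvl, -1) >= min_rank:
--             yield line
-- ===== SOURCE B (Python) =====
-- _LEVELS = ["DEBUG", "INFO", "WARN", "WARNING", "ERROR", "CRITICAL", "FATAL"]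
--
-- def filter_level(lines, min_level):
--     # Tokens of strictly lower severity than the threshold are forbidden;
--     # a line passes iff none of them occurs in it.
--     forbidden = _LEVELS[:_LEVELS.index(min_level.upper())]
--     for line in lines:
--         u = line.upper()
--         if not any(tok in u for tok in forbidden):
--             yield line
-- ===== Notes on version B (the rewrite author's own statement) =====
-- stated objective: simpler
-- what changed: B drops the _line_level scan and the rank dictionary entirely: it precomputes the below-threshold tokens _LEVELS[:index] once and keeps a line iff none of those forbidden tokens occurs in its uppercase form.
import Mathlib
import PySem

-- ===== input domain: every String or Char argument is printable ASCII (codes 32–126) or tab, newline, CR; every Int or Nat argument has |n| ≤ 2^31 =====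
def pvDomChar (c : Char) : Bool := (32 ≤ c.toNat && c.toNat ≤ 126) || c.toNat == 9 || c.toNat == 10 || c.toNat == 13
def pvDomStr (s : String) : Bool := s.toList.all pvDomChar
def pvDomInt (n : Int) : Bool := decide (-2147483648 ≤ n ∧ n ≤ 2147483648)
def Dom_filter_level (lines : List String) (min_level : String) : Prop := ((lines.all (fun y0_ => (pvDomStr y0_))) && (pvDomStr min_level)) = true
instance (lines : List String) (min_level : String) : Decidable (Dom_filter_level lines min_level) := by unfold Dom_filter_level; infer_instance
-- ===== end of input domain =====

-- B is simpler: it precomputes the forbidden below-threshold tokens _LEVELS[:index]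
-- and keeps a line iff none of them occurs, dropping A's _line_level helper and rank dict.
-- Both generators are ported as the list of yielded lines.

-- ===== PORT A =====
def pyLEVELS : List String := ["DEBUG", "INFO", "WARN", "WARNING", "ERROR", "CRITICAL", "FATAL"]

def pyLEVEL_RANK : PySem.Dict String Int :=
  (PySem.List.enumerate pyLEVELS).foldl (fun d p => d.insert p.2 p.1) PySem.Dict.empty

def lineLevelGo (upper : String) : List String → Option String
  | [] => none
  | lvl :: rest => if PySem.Str.isIn lvl upper then some lvl else lineLevelGo upper rest

def line_level (line : String) : Option String :=
  lineLevelGo (PySem.Str.upper line) pyLEVELS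

def filter_level (lines : List String) (min_level : String) : List String :=
  match pyLEVEL_RANK.get? (PySem.Str.upper min_level) with
  | none => []  -- Python raises ValueError here; excluded by Pre_filter_level
  | some min_rank =>
    lines.foldl (fun acc line =>
      match line_level line with
      | none => acc ++ [line]
      | some lvl => if pyLEVEL_RANK.getD lvl (-1) ≥ min_rank then acc ++ [line] else acc) []

-- ===== PORT B =====
def filter_level_alt (lines : List String) (min_level : String) : List String :=
  match PySem.List.index? pyLEVELS (PySem.Str.upper min_level) with
  | none => []  -- list.index raises ValueError here; excluded by Pre_filter_level
  | some i =>
    let forbidden := PySem.List.slice pyLEVELS none (some (i : Int))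
    lines.filter (fun line =>
      !(forbidden.any (fun tok => PySem.Str.isIn tok (PySem.Str.upper line))))

-- ===== PRECONDITION & SPEC =====
-- Pre_ excludes exactly the inputs where A (and B) raise ValueError: unknown min_level.
def Pre_filter_level (lines : List String) (min_level : String) : Prop :=
  PySem.Str.upper min_level ∈ pyLEVELS
instance (lines : List String) (min_level : String) : Decidable (Pre_filter_level lines min_level) := by unfold Pre_filter_level; infer_instance

def pvWitness_filter_level : List String × String := (["2020 ERROR boom", "all good"], "warn")

def Spec_filter_level (lines : List String) (min_level : String) (out : List String) : Prop := out = filter_level_alt lines min_level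
instance (lines : List String) (min_level : String) (out : List String) : Decidable (Spec_filter_level lines min_level out) := by unfold Spec_filter_level; infer_instance

-- ===== CLAIM (what is proved, stated in full; the proofs are below) =====
def Claim_equal_filter_level : Prop := ∀ (lines : List String) (min_level : String), Dom_filter_level lines min_level → Pre_filter_level lines min_level → Spec_filter_level lines min_level (filter_level lines min_level)

-- ===== LEMMAS AND PROOFS =====

-- A's per-line keep decision, as a Boolean predicate.
def keepA (r : Int) (line : String) : Bool :=
  match line_level line with
  | none => true
  | some lvl => decide (pyLEVEL_RANK.getD lvl (-1) ≥ r)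

lemma keepA_match (o : Option String) (r : Int) (acc : List String) (line : String) :
    (match o with
      | none => acc ++ [line]
      | some lvl => if pyLEVEL_RANK.getD lvl (-1) ≥ r then acc ++ [line] else acc)
    = if (match o with
          | none => true
          | some lvl => decide (pyLEVEL_RANK.getD lvl (-1) ≥ r)) then acc ++ [line] else acc := by
  cases o with
  | none => simp
  | some lvl => by_cases h : pyLEVEL_RANK.getD lvl (-1) ≥ r <;> simp [h]

lemma filter_level_body (r : Int) :
    (fun (acc : List String) line =>
      match line_level line with
      | none => acc ++ [line]
      | some lvl => if pyLEVEL_RANK.getD lvl (-1) ≥ r then acc ++ [line] else acc)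
    = fun acc line => if keepA r line then acc ++ [line] else acc := by
  funext acc line
  exact keepA_match (line_level line) r acc line

lemma line_level_eq (line : String) : line_level line =
    (if PySem.Str.isIn "DEBUG" (PySem.Str.upper line) then some "DEBUG" else
     if PySem.Str.isIn "INFO" (PySem.Str.upper line) then some "INFO" else
     if PySem.Str.isIn "WARN" (PySem.Str.upper line) then some "WARN" else
     if PySem.Str.isIn "WARNING" (PySem.Str.upper line) then some "WARNING" else
     if PySem.Str.isIn "ERROR" (PySem.Str.upper line) then some "ERROR" else
     if PySem.Str.isIn "CRITICAL" (PySem.Str.upper line) then some "CRITICAL" else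
     if PySem.Str.isIn "FATAL" (PySem.Str.upper line) then some "FATAL" else none) := rfl

-- The heart: A's keep decision at rank r equals "no token of severity < r occurs".
lemma keep_eq (r : Fin 7) (line : String) :
    keepA ((r : Nat) : Int) line
      = !((pyLEVELS.take (r : Nat)).any (fun tok => PySem.Str.isIn tok (PySem.Str.upper line))) := by
  fin_cases r
  · show keepA 0 line = !((["DEBUG", "INFO", "WARN", "WARNING", "ERROR", "CRITICAL", "FATAL"].take 0).any
      (fun tok => PySem.Str.isIn tok (PySem.Str.upper line)))
    simp only [keepA, line_level_eq, List.take, List.any_cons, List.any_nil]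
    generalize PySem.Str.isIn "DEBUG" (PySem.Str.upper line) = b0
    generalize PySem.Str.isIn "INFO" (PySem.Str.upper line) = b1
    generalize PySem.Str.isIn "WARN" (PySem.Str.upper line) = b2
    generalize PySem.Str.isIn "WARNING" (PySem.Str.upper line) = b3
    generalize PySem.Str.isIn "ERROR" (PySem.Str.upper line) = b4
    generalize PySem.Str.isIn "CRITICAL" (PySem.Str.upper line) = b5
    generalize PySem.Str.isIn "FATAL" (PySem.Str.upper line) = b6
    revert b0 b1 b2 b3 b4 b5 b6
    decide
  · show keepA 1 line = !((["DEBUG", "INFO", "WARN", "WARNING", "ERROR", "CRITICAL", "FATAL"].take 1).any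
      (fun tok => PySem.Str.isIn tok (PySem.Str.upper line)))
    simp only [keepA, line_level_eq, List.take, List.any_cons, List.any_nil]
    generalize PySem.Str.isIn "DEBUG" (PySem.Str.upper line) = b0
    generalize PySem.Str.isIn "INFO" (PySem.Str.upper line) = b1
    generalize PySem.Str.isIn "WARN" (PySem.Str.upper line) = b2
    generalize PySem.Str.isIn "WARNING" (PySem.Str.upper line) = b3
    generalize PySem.Str.isIn "ERROR" (PySem.Str.upper line) = b4
    generalize PySem.Str.isIn "CRITICAL" (PySem.Str.upper line) = b5
    generalize PySem.Str.isIn "FATAL" (PySem.Str.upper line) = b6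
    revert b0 b1 b2 b3 b4 b5 b6
    decide
  · show keepA 2 line = !((["DEBUG", "INFO", "WARN", "WARNING", "ERROR", "CRITICAL", "FATAL"].take 2).any
      (fun tok => PySem.Str.isIn tok (PySem.Str.upper line)))
    simp only [keepA, line_level_eq, List.take, List.any_cons, List.any_nil]
    generalize PySem.Str.isIn "DEBUG" (PySem.Str.upper line) = b0
    generalize PySem.Str.isIn "INFO" (PySem.Str.upper line) = b1
    generalize PySem.Str.isIn "WARN" (PySem.Str.upper line) = b2
    generalize PySem.Str.isIn "WARNING" (PySem.Str.upper line) = b3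
    generalize PySem.Str.isIn "ERROR" (PySem.Str.upper line) = b4
    generalize PySem.Str.isIn "CRITICAL" (PySem.Str.upper line) = b5
    generalize PySem.Str.isIn "FATAL" (PySem.Str.upper line) = b6
    revert b0 b1 b2 b3 b4 b5 b6
    decide
  · show keepA 3 line = !((["DEBUG", "INFO", "WARN", "WARNING", "ERROR", "CRITICAL", "FATAL"].take 3).any
      (fun tok => PySem.Str.isIn tok (PySem.Str.upper line)))
    simp only [keepA, line_level_eq, List.take, List.any_cons, List.any_nil]
    generalize PySem.Str.isIn "DEBUG" (PySem.Str.upper line) = b0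
    generalize PySem.Str.isIn "INFO" (PySem.Str.upper line) = b1
    generalize PySem.Str.isIn "WARN" (PySem.Str.upper line) = b2
    generalize PySem.Str.isIn "WARNING" (PySem.Str.upper line) = b3
    generalize PySem.Str.isIn "ERROR" (PySem.Str.upper line) = b4
    generalize PySem.Str.isIn "CRITICAL" (PySem.Str.upper line) = b5
    generalize PySem.Str.isIn "FATAL" (PySem.Str.upper line) = b6
    revert b0 b1 b2 b3 b4 b5 b6
    decide
  · show keepA 4 line = !((["DEBUG", "INFO", "WARN", "WARNING", "ERROR", "CRITICAL", "FATAL"].take 4).any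
      (fun tok => PySem.Str.isIn tok (PySem.Str.upper line)))
    simp only [keepA, line_level_eq, List.take, List.any_cons, List.any_nil]
    generalize PySem.Str.isIn "DEBUG" (PySem.Str.upper line) = b0
    generalize PySem.Str.isIn "INFO" (PySem.Str.upper line) = b1
    generalize PySem.Str.isIn "WARN" (PySem.Str.upper line) = b2
    generalize PySem.Str.isIn "WARNING" (PySem.Str.upper line) = b3
    generalize PySem.Str.isIn "ERROR" (PySem.Str.upper line) = b4
    generalize PySem.Str.isIn "CRITICAL" (PySem.Str.upper line) = b5
    generalize PySem.Str.isIn "FATAL" (PySem.Str.upper line) = b6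
    revert b0 b1 b2 b3 b4 b5 b6
    decide
  · show keepA 5 line = !((["DEBUG", "INFO", "WARN", "WARNING", "ERROR", "CRITICAL", "FATAL"].take 5).any
      (fun tok => PySem.Str.isIn tok (PySem.Str.upper line)))
    simp only [keepA, line_level_eq, List.take, List.any_cons, List.any_nil]
    generalize PySem.Str.isIn "DEBUG" (PySem.Str.upper line) = b0
    generalize PySem.Str.isIn "INFO" (PySem.Str.upper line) = b1
    generalize PySem.Str.isIn "WARN" (PySem.Str.upper line) = b2
    generalize PySem.Str.isIn "WARNING" (PySem.Str.upper line) = b3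
    generalize PySem.Str.isIn "ERROR" (PySem.Str.upper line) = b4
    generalize PySem.Str.isIn "CRITICAL" (PySem.Str.upper line) = b5
    generalize PySem.Str.isIn "FATAL" (PySem.Str.upper line) = b6
    revert b0 b1 b2 b3 b4 b5 b6
    decide
  · show keepA 6 line = !((["DEBUG", "INFO", "WARN", "WARNING", "ERROR", "CRITICAL", "FATAL"].take 6).any
      (fun tok => PySem.Str.isIn tok (PySem.Str.upper line)))
    simp only [keepA, line_level_eq, List.take, List.any_cons, List.any_nil]
    generalize PySem.Str.isIn "DEBUG" (PySem.Str.upper line) = b0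
    generalize PySem.Str.isIn "INFO" (PySem.Str.upper line) = b1
    generalize PySem.Str.isIn "WARN" (PySem.Str.upper line) = b2
    generalize PySem.Str.isIn "WARNING" (PySem.Str.upper line) = b3
    generalize PySem.Str.isIn "ERROR" (PySem.Str.upper line) = b4
    generalize PySem.Str.isIn "CRITICAL" (PySem.Str.upper line) = b5
    generalize PySem.Str.isIn "FATAL" (PySem.Str.upper line) = b6
    revert b0 b1 b2 b3 b4 b5 b6
    decide

lemma both_at (i : Fin 7) (lines : List String) :
    lines.foldl (fun acc line =>
      match line_level line with
      | none => acc ++ [line]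
      | some lvl => if pyLEVEL_RANK.getD lvl (-1) ≥ ((i : Nat) : Int) then acc ++ [line] else acc) []
    = lines.filter (fun line =>
        !((pyLEVELS.take (i : Nat)).any (fun tok => PySem.Str.isIn tok (PySem.Str.upper line)))) := by
  rw [filter_level_body, PySem.List.foldl_append_if]
  simp only [List.nil_append, List.map_id']
  exact List.filter_congr (fun line _ => keep_eq i line)

lemma ports_agree (lines : List String) (min_level : String) (i : Fin 7)
    (hget : pyLEVEL_RANK.get? (PySem.Str.upper min_level) = some ((i : Nat) : Int))
    (hidx : PySem.List.index? pyLEVELS (PySem.Str.upper min_level) = some (i : Nat)) :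
    filter_level lines min_level = filter_level_alt lines min_level := by
  unfold filter_level filter_level_alt
  rw [hget, hidx]
  simp only [PySem.List.slice_to pyLEVELS (Int.natCast_nonneg (i : Nat)), Int.toNat_natCast]
  exact both_at i lines

-- ===== VERDICT (by name: the statement is the Claim_ definition above) =====
theorem filter_level_spec : Claim_equal_filter_level := by
  intro lines min_level _ hpre
  unfold Spec_filter_level
  unfold Pre_filter_level pyLEVELS at hpre
  simp only [List.mem_cons, List.not_mem_nil, or_false] at hpre
  rcases hpre with h | h | h | h | h | h | h
  · exact ports_agree lines min_level 0 (by rw [h]; decide) (by rw [h]; decide)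
  · exact ports_agree lines min_level 1 (by rw [h]; decide) (by rw [h]; decide)
  · exact ports_agree lines min_level 2 (by rw [h]; decide) (by rw [h]; decide)
  · exact ports_agree lines min_level 3 (by rw [h]; decide) (by rw [h]; decide)
  · exact ports_agree lines min_level 4 (by rw [h]; decide) (by rw [h]; decide)
  · exact ports_agree lines min_level 5 (by rw [h]; decide) (by rw [h]; decide)
  · exact ports_agree lines min_level 6 (by rw [h]; decide) (by rw [h]; decide)
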